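-- pv_equiv track=rewrite | github.com/raphy0316/basketball-form-analyzer | shooting_comparison/landing_analyzer.py | _get_follow_through_and_post_frames
-- ===== SOURCE A (Python) =====
-- from typing import Dict, List, Tuple, Optional, Union
--
-- def _get_follow_through_and_post_frames(frames: List[Dict]) -> Tuple[List[Dict], List[Dict]]:
--     """
--     Get follow-through frames and frames after follow-through.
--
--     Args:
--         frames: List of frame data
--
--     Returns:
--         Tuple of (follow_through_frames, post_follow_through_frames)
--     """
--     follow_through_frames = []
--     post_follow_through_frames = []
--     in_follow_through = False
--     follow_through_ended = False
--
--     for frame in frames: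
--         phase = frame.get('phase', '')
--
--         if phase == 'Follow-through':
--             follow_through_frames.append(frame)
--             in_follow_through = True
--             follow_through_ended = False
--         elif in_follow_through and phase != 'Follow-through':
--             # First frame after follow-through
--             post_follow_through_frames.append(frame)
--             in_follow_through = False
--             follow_through_ended = True
--         elif follow_through_ended:
--             # Continue collecting post follow-through frames
--             post_follow_through_frames.append(frame)
--
--     return follow_through_frames, post_follow_through_frames
-- ===== SOURCE B (Python) =====
-- from typing import Dict, List, Tuple
--
--
-- def _get_follow_through_and_post_frames(frames: List[Dict]) -> Tuple[List[Dict], List[Dict]]: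
--     """Anchor-find-then-filter decomposition (no flag-driven state machine)."""
--     is_ft = lambda frame: frame.get('phase', '') == 'Follow-through'
--     follow_through_frames = [f for f in frames if is_ft(f)]
--     first = next((i for i, f in enumerate(frames) if is_ft(f)), None)
--     if first is None:
--         post_follow_through_frames = []
--     else:
--         post_follow_through_frames = [f for f in frames[first + 1:] if not is_ft(f)]
--     return follow_through_frames, post_follow_through_frames
-- ===== Notes on version B (the rewrite author's own statement) =====
-- stated objective: simpler
-- what changed: Replaced the flag-driven single-pass state machine (in_follow_through/follow_through_ended booleans) with an anchor-find-then-filter decomposition: filter all Follow-through frames, find the first such frame's index, and filter the non-Follow-through frames strictly after it.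
import Mathlib
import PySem

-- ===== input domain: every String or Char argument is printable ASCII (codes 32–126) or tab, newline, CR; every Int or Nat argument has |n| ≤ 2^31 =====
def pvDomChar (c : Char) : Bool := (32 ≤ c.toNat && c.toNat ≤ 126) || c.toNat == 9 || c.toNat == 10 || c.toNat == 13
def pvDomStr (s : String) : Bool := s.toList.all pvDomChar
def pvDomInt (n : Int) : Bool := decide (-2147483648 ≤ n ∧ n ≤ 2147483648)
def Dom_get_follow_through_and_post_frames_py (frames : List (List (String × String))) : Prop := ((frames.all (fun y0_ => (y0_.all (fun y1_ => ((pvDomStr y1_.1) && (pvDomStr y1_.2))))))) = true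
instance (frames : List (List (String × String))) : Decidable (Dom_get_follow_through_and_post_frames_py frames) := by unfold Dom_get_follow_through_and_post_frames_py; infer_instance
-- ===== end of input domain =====

-- B replaces A's flag-driven single-pass state machine with an anchor-find-then-filter decomposition (objective: simpler); same return values.


-- ===== PORT A =====
-- A: single pass with in_follow_through / follow_through_ended flags
def pvPhase (frame : List (String × String)) : String :=
  (((frame.find? (fun kv => kv.1 == "phase")).map (·.2)).getD "")

-- A's loop body (state: follow_through_frames, post_follow_through_frames, in_follow_through, follow_through_ended)
def pvStepA (st : List (List (String × String)) × List (List (String × String)) × Bool × Bool)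
    (frame : List (String × String)) :
    List (List (String × String)) × List (List (String × String)) × Bool × Bool :=
  let ft := st.1; let post := st.2.1; let inFT := st.2.2.1; let ended := st.2.2.2
  let phase := pvPhase frame
  if phase == "Follow-through" then (ft ++ [frame], post, true, false)
  else if inFT && !(phase == "Follow-through") then (ft, post ++ [frame], false, true)
  else if ended then (ft, post ++ [frame], inFT, ended)
  else st

def get_follow_through_and_post_frames_py (frames : List (List (String × String))) : (List (List (String × String))) × (List (List (String × String))) :=
  let s := frames.foldl pvStepA ([], [], false, false)
  (s.1, s.2.1)

-- B: filter all follow-through frames; find the first one's index; filter non-FT frames strictly after it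
def get_follow_through_and_post_frames_py_alt (frames : List (List (String × String))) : (List (List (String × String))) × (List (List (String × String))) :=
  let isFT := fun (frame : List (String × String)) => pvPhase frame == "Follow-through"
  let ftFrames := frames.filter isFT
  let post :=
    match frames.findIdx? isFT with
    | none => []
    | some i => (frames.drop (i + 1)).filter (fun f => !isFT f)
  (ftFrames, post)

-- ===== PRECONDITION & SPEC =====
def Spec_get_follow_through_and_post_frames_py (frames : List (List (String × String))) (out : (List (List (String × String))) × (List (List (String × String)))) : Prop := out = get_follow_through_and_post_frames_py_alt frames
instance (frames : List (List (String × String))) (out : (List (List (String × String))) × (List (List (String × String)))) : Decidable (Spec_get_follow_through_and_post_frames_py frames out) := by unfold Spec_get_follow_through_and_post_frames_py; infer_instance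

-- ===== CLAIM (what is proved, stated in full; the proofs are below) =====
def Claim_equal_get_follow_through_and_post_frames_py : Prop := ∀ (frames : List (List (String × String))), Dom_get_follow_through_and_post_frames_py frames → Spec_get_follow_through_and_post_frames_py frames (get_follow_through_and_post_frames_py frames)

-- ===== LEMMAS AND PROOFS =====

-- ===== VERDICT (by name: the statement is the Claim_ definition above) =====

-- once a follow-through frame has been seen (inFT ∨ ended), A appends every FT frame to ft
-- and every non-FT frame to post, and the "seen" invariant persists
theorem pvLoop_seen (l : List (List (String × String)))
    (ft post : List (List (String × String))) (b1 b2 : Bool) (h : (b1 || b2) = true) :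
    ∃ c1 c2, l.foldl pvStepA (ft, post, b1, b2) =
      (ft ++ l.filter (fun f => pvPhase f == "Follow-through"),
       post ++ l.filter (fun f => !(pvPhase f == "Follow-through")), c1, c2) ∧ (c1 || c2) = true := by
  induction l generalizing ft post b1 b2 with
  | nil => exact ⟨b1, b2, by simp, h⟩
  | cons a l ih =>
    by_cases hft : (pvPhase a == "Follow-through") = true
    · obtain ⟨c1, c2, heq, hc⟩ := ih (ft ++ [a]) post true false rfl
      exact ⟨c1, c2, by simp [pvStepA, hft, heq], hc⟩
    · obtain ⟨c1, c2, heq, hc⟩ := ih ft (post ++ [a]) false true rfl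
      rcases Bool.or_eq_true_iff.1 h with h1 | h2
      · exact ⟨c1, c2, by simp [pvStepA, hft, h1, heq], hc⟩
      · refine ⟨c1, c2, ?_, hc⟩
        by_cases h1 : b1 = true
        · simp [pvStepA, hft, h1, heq]
        · simp at h1; simp [pvStepA, hft, h1, h2, heq]

-- main invariant from the initial (unseen) state: ft collects all FT frames; post is empty
-- until the first FT frame, then collects the non-FT frames after it (= B's computation)
theorem pvLoop_unseen (l : List (List (String × String))) (ft post : List (List (String × String))) :
    (l.foldl pvStepA (ft, post, false, false)).1 = ft ++ l.filter (fun f => pvPhase f == "Follow-through") ∧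
    (l.foldl pvStepA (ft, post, false, false)).2.1 =
      post ++ (match l.findIdx? (fun f => pvPhase f == "Follow-through") with
        | none => []
        | some i => (l.drop (i + 1)).filter (fun f => !(pvPhase f == "Follow-through"))) := by
  induction l generalizing ft post with
  | nil => simp
  | cons a l ih =>
    by_cases hft : (pvPhase a == "Follow-through") = true
    · obtain ⟨c1, c2, heq, _⟩ := pvLoop_seen l (ft ++ [a]) post true false rfl
      simp [pvStepA, hft, heq, List.findIdx?_cons]
    · obtain ⟨h1, h2⟩ := ih ft post
      constructor
      · simpa [pvStepA, hft] using h1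
      · rw [List.foldl_cons]
        have hstep : pvStepA (ft, post, false, false) a = (ft, post, false, false) := by
          simp [pvStepA, hft]
        rw [hstep, h2, List.findIdx?_cons]
        cases hidx : l.findIdx? (fun f => pvPhase f == "Follow-through") with
        | none => simp [hft]
        | some i => simp [hft]

theorem get_follow_through_and_post_frames_py_spec : Claim_equal_get_follow_through_and_post_frames_py := by
  intro frames _
  unfold Spec_get_follow_through_and_post_frames_py
  obtain ⟨h1, h2⟩ := pvLoop_unseen frames [] []
  simp only [get_follow_through_and_post_frames_py, get_follow_through_and_post_frames_py_alt]
  simp only [List.nil_append] at h1 h2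
  exact Prod.ext h1 h2
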